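-- pv_equiv track=rewrite | github.com/oyonder/Advent_of_code_2023 | 08.py | find_n_steps_part1
-- ===== SOURCE A (Python) =====
-- def find_n_steps_part1(node_start, node_end, instructions, connections):
--     n_steps = 0
--     node = node_start
--     while node != node_end:
--         for instruction in instructions:
--             node = connections[node+instruction]
--             n_steps += 1
--             if node == node_end:
--                 break
--     return n_steps
-- ===== SOURCE B (Python) =====
-- def find_n_steps_part1(node_start, node_end, instructions, connections):
--     # Pass-compression: precompute for every candidate pass-start node the
--     # outcome of one full instruction pass, then jump pass-by-pass via the table.
--     if node_start == node_end:
--         return 0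
--     nodes = {node_start}
--     nodes.update(connections.values())
--     table = {}
--     for nd in nodes:
--         cur = nd
--         k = 0
--         ok = True
--         for ins in instructions:
--             nxt = connections.get(cur + ins)
--             if nxt is None:
--                 ok = False
--                 break
--             cur = nxt
--             k += 1
--             if cur == node_end:
--                 break
--         if ok:
--             table[nd] = (k, cur)
--     n_steps = 0
--     node = node_start
--     while node != node_end:
--         k, node = table[node]
--         n_steps += k
--     return n_steps
-- ===== Notes on version B (the rewrite author's own statement) =====
-- stated objective: alternative
-- what changed: Instead of A's nested while/for walk with a lookup at every step, B first builds a jump table mapping every candidate pass-start node (the start node and all connection values) to the outcome (step count, landing node) of one full instruction pass, then the main traversal jumps pass-by-pass through that table with a single lookup per pass; it trades O(|nodes|*|instructions|) precomputation for a lookup-free per-step traversal.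
import Mathlib
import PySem

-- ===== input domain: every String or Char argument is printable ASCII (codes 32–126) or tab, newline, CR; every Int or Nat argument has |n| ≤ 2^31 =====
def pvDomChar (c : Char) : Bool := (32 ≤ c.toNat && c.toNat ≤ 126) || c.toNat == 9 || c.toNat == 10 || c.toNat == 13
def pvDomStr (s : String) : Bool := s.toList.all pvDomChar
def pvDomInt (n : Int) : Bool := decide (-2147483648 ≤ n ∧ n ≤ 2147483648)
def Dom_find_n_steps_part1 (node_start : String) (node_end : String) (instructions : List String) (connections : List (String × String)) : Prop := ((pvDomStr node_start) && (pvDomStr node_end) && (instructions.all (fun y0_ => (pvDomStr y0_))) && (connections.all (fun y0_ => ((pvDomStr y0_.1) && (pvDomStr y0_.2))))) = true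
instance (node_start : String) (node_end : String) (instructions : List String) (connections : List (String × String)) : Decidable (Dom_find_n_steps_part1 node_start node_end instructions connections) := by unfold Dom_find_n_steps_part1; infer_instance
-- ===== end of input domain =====

-- B replaces A's per-step nested walk by a precomputed pass-compression jump table over the
-- candidate nodes, then jumps pass-by-pass (objective: alternative); equality proved on Pre_.

-- ===== PORT A =====
-- A's inner 'for instruction in instructions' pass: one step per instruction, breaking as soon
-- as node == node_end; 'none' is a KeyError of 'connections[node+instruction]' (outside Pre_).
def pvInnerA (connections : List (String × String)) (node_end : String) :
    List String → String → Int → Option (String × Int)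
  | [], node, n => some (node, n)
  | ins :: rest, node, n =>
    match (PySem.Dict.mk connections).get? (node ++ ins) with
    | none => none
    | some node' =>
      if node' == node_end then some (node', n + 1)
      else pvInnerA connections node_end rest node' (n + 1)

-- enough fuel for both loops: a run of A that terminates revisits no (node, position-in-
-- instructions) state, so it takes at most (|connections|+1)·(|instructions|+1) steps.
def pvFuel (instructions : List String) (connections : List (String × String)) : Nat :=
  (connections.length + 1) * (instructions.length + 1) + 1

-- A's outer 'while node != node_end', fuelled; inside Pre_ the fuel is never exhausted.
def pvLoopA (connections : List (String × String)) (node_end : String)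
    (instructions : List String) : Nat → String → Int → Int
  | 0, _, n => n
  | f + 1, node, n =>
    if node == node_end then n
    else
      match pvInnerA connections node_end instructions node n with
      | none => n
      | some (node', n') => pvLoopA connections node_end instructions f node' n'

def find_n_steps_part1 (node_start : String) (node_end : String) (instructions : List String) (connections : List (String × String)) : Int :=
  pvLoopA connections node_end instructions (pvFuel instructions connections) node_start 0

-- ===== PORT B =====
-- Source B's table-building inner pass: walks one full instruction pass from cur, counting steps,
-- stopping early at node_end; Bool = the Python 'ok' flag (false = a connections.get miss).
def pvPassB (connections : List (String × String)) (node_end : String) :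
    List String → String → Int → String × Int × Bool
  | [], cur, k => (cur, k, true)
  | ins :: rest, cur, k =>
    match (PySem.Dict.mk connections).get? (cur ++ ins) with
    | none => (cur, k, false)
    | some nxt =>
      if nxt == node_end then (nxt, k + 1, true)
      else pvPassB connections node_end rest nxt (k + 1)

-- Source B's table: nodes = {node_start} ∪ connections.values(); table[nd] = (k, cur) when ok.
-- (the table is only looked up afterwards, so the set's iteration order cannot matter)
def pvTableB (node_start : String) (node_end : String) (instructions : List String)
    (connections : List (String × String)) : PySem.Dict String (Int × String) :=
  (PySem.Set.update (PySem.Set.ofList [node_start]) (connections.map Prod.snd)).foldl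
    (fun d nd =>
      let r := pvPassB connections node_end instructions nd 0
      if r.2.2 then d.insert nd (r.2.1, r.1) else d)
    PySem.Dict.empty

-- Source B's 'while node != node_end' jump loop: one table lookup per whole pass; fuelled,
-- never exhausted inside Pre_ ('none' is the KeyError table[node], outside Pre_).
def pvJumpB (table : PySem.Dict String (Int × String)) (node_end : String) :
    Nat → String → Int → Int
  | 0, _, n => n
  | f + 1, node, n =>
    if node == node_end then n
    else
      match table.get? node with
      | none => n
      | some (k, node') => pvJumpB table node_end f node' (n + k)

def find_n_steps_part1_alt (node_start : String) (node_end : String) (instructions : List String) (connections : List (String × String)) : Int :=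
  if node_start == node_end then 0
  else pvJumpB (pvTableB node_start node_end instructions connections) node_end
    (pvFuel instructions connections) node_start 0

-- ===== PRECONDITION & SPEC =====
-- Does the instruction walk reach node_end within f steps? (Bool, decidable.)
def pvReaches (connections : List (String × String)) (node_end : String)
    (instructions : List String) : Nat → String → Nat → Bool
  | 0, node, _ => node == node_end
  | f + 1, node, i =>
    node == node_end ||
      (!instructions.isEmpty &&
        match instructions[i]? with
        | none => false
        | some ins =>
          match (PySem.Dict.mk connections).get? (node ++ ins) with
          | none => false
          | some node' =>
            pvReaches connections node_end instructions f node'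
              (if i + 1 < instructions.length then i + 1 else 0))

-- Pre_ excludes exactly the inputs on which A does NOT return: where a lookup raises KeyError or
-- the walk never meets node_end (A loops forever). A terminating run of A revisits no
-- (node, position) state, so by pigeonhole it reaches node_end within pvFuel steps: the bounded
-- check below is precisely A's halting set, and excludes no input on which A returns a value.
def Pre_find_n_steps_part1 (node_start : String) (node_end : String) (instructions : List String) (connections : List (String × String)) : Prop :=
  pvReaches connections node_end instructions (pvFuel instructions connections) node_start 0 = true
instance (node_start : String) (node_end : String) (instructions : List String) (connections : List (String × String)) : Decidable (Pre_find_n_steps_part1 node_start node_end instructions connections) := by unfold Pre_find_n_steps_part1; infer_instance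

def pvWitness_find_n_steps_part1 : String × String × List String × (List (String × String)) :=
  ("AAA", "ZZZ", ["L"], [("AAAL", "ZZZ")])

def Spec_find_n_steps_part1 (node_start : String) (node_end : String) (instructions : List String) (connections : List (String × String)) (out : Int) : Prop := out = find_n_steps_part1_alt node_start node_end instructions connections
instance (node_start : String) (node_end : String) (instructions : List String) (connections : List (String × String)) (out : Int) : Decidable (Spec_find_n_steps_part1 node_start node_end instructions connections out) := by unfold Spec_find_n_steps_part1; infer_instance

-- ===== CLAIM (what is proved, stated in full; the proofs are below) =====
def Claim_equal_find_n_steps_part1 : Prop := ∀ (node_start : String) (node_end : String) (instructions : List String) (connections : List (String × String)), Dom_find_n_steps_part1 node_start node_end instructions connections → Pre_find_n_steps_part1 node_start node_end instructions connections → Spec_find_n_steps_part1 node_start node_end instructions connections (find_n_steps_part1 node_start node_end instructions connections)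

-- ===== LEMMAS AND PROOFS =====

theorem pvWitness_ok :
    Dom_find_n_steps_part1 pvWitness_find_n_steps_part1.1 pvWitness_find_n_steps_part1.2.1
      pvWitness_find_n_steps_part1.2.2.1 pvWitness_find_n_steps_part1.2.2.2 ∧
    Pre_find_n_steps_part1 pvWitness_find_n_steps_part1.1 pvWitness_find_n_steps_part1.2.1
      pvWitness_find_n_steps_part1.2.2.1 pvWitness_find_n_steps_part1.2.2.2 := by decide

theorem pvLoopA_of_end (c : List (String × String)) (e : String) (instrs : List String)
    (f : Nat) (node : String) (n : Int) (h : (node == e) = true) :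
    pvLoopA c e instrs f node n = n := by
  cases f <;> simp [pvLoopA, h]

theorem pvJumpB_of_end (t : PySem.Dict String (Int × String)) (e : String)
    (f : Nat) (node : String) (n : Int) (h : (node == e) = true) :
    pvJumpB t e f node n = n := by
  cases f <;> simp [pvJumpB, h]

theorem pvReaches_mono (c : List (String × String)) (e : String) (instrs : List String) :
    ∀ (f f' : Nat) (node : String) (i : Nat), f ≤ f' →
      pvReaches c e instrs f node i = true → pvReaches c e instrs f' node i = true := by
  intro f
  induction f with
  | zero =>
    intro f' node i _ hr
    have h : (node == e) = true := by simpa [pvReaches] using hr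
    cases f' <;> simp [pvReaches, h]
  | succ g ih =>
    intro f' node i hle hr
    obtain ⟨g', rfl⟩ : ∃ g', f' = g' + 1 := ⟨f' - 1, by omega⟩
    by_cases hend : (node == e) = true
    · simp [pvReaches, hend]
    · have hend' : (node == e) = false := by simpa using hend
      rw [pvReaches, hend'] at hr ⊢
      simp only [Bool.false_or] at hr ⊢
      cases hie : instrs.isEmpty
      · simp only [hie, Bool.not_false, Bool.true_and] at hr ⊢
        cases hget : instrs[i]? with
        | none => simp [hget] at hr
        | some ins =>
          simp only [hget] at hr ⊢
          cases hstep : (PySem.Dict.mk c).get? (node ++ ins) with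
          | none => simp [hstep] at hr
          | some node' =>
            simp only [hstep] at hr ⊢
            exact ih g' node' _ (by omega) hr
      · simp [hie] at hr

-- a value found by get? on Dict.mk c is one of c's values
theorem pvGetMkMem : ∀ (c : List (String × String)) (k : String) (v : String),
    (PySem.Dict.mk c).get? k = some v → v ∈ c.map Prod.snd := by
  intro c
  induction c with
  | nil => intro k v h; simp [PySem.Dict.get?] at h
  | cons p rest ih =>
    intro k v h
    rw [show (p : String × String) = (p.1, p.2) from rfl, PySem.Dict.get?_mk_cons] at h
    by_cases hk : (p.1 == k) = true
    · rw [if_pos hk] at h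
      simp only [Option.some.injEq] at h
      simp [← h]
    · rw [if_neg hk] at h
      simpa using Or.inr (ih k v h)

-- B's table-pass and A's inner pass compute the same thing: ok=true means A's pass returns.
theorem pvPassInner (c : List (String × String)) (e : String) :
    ∀ (L : List String) (node : String) (n k : Int),
      pvInnerA c e L node n =
        (if (pvPassB c e L node k).2.2 = true
         then some ((pvPassB c e L node k).1, n + (pvPassB c e L node k).2.1 - k)
         else none) := by
  intro L
  induction L with
  | nil =>
    intro node n k
    simp [pvInnerA, pvPassB]
  | cons ins rest ih =>
    intro node n k
    rw [pvInnerA, pvPassB]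
    cases hstep : (PySem.Dict.mk c).get? (node ++ ins) with
    | none => simp
    | some nxt =>
      by_cases hend : (nxt == e) = true
      · simp only [hend, if_true]
        simp only [Option.some.injEq, Prod.mk.injEq, true_and]
        omega
      · have hend' : (nxt == e) = false := by simpa using hend
        simp only [hend', Bool.false_eq_true, if_false]
        rw [ih nxt (n + 1) (k + 1)]
        by_cases hok : (pvPassB c e rest nxt (k + 1)).2.2 = true
        · rw [if_pos hok, if_pos hok]
          simp only [Option.some.injEq, Prod.mk.injEq, true_and]
          omega
        · rw [if_neg hok, if_neg hok]

-- get? of the table fold: an entry exists iff the key is a listed node with ok=true,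
-- and then it stores (step count, landing node) of its pass.
theorem pvTableFold (c : List (String × String)) (e : String) (instrs : List String) :
    ∀ (ns : List String) (d : PySem.Dict String (Int × String)) (x : String),
      (ns.foldl
        (fun d nd =>
          let r := pvPassB c e instrs nd 0
          if r.2.2 then d.insert nd (r.2.1, r.1) else d) d).get? x =
      (if x ∈ ns ∧ (pvPassB c e instrs x 0).2.2 = true
       then some ((pvPassB c e instrs x 0).2.1, (pvPassB c e instrs x 0).1)
       else d.get? x) := by
  intro ns
  induction ns with
  | nil => intro d x; simp
  | cons a ns ih =>
    intro d x
    rw [List.foldl_cons, ih]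
    by_cases hin : x ∈ ns ∧ (pvPassB c e instrs x 0).2.2 = true
    · rw [if_pos hin, if_pos ⟨List.mem_cons_of_mem a hin.1, hin.2⟩]
    · rw [if_neg hin]
      by_cases hxa : x = a
      · subst hxa
        by_cases hok : (pvPassB c e instrs x 0).2.2 = true
        · have hcond : x ∈ x :: ns ∧ (pvPassB c e instrs x 0).2.2 = true := ⟨by simp, hok⟩
          rw [if_pos hcond]
          simp [hok]
        · have hok' : (pvPassB c e instrs x 0).2.2 = false := by simpa using hok
          have hcond : ¬ (x ∈ x :: ns ∧ (pvPassB c e instrs x 0).2.2 = true) := fun h => hok h.2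
          rw [if_neg hcond]
          simp [hok']
      · have hne2 : ¬ (x ∈ a :: ns ∧ (pvPassB c e instrs x 0).2.2 = true) := by
          rintro ⟨h1, h2⟩
          rcases List.mem_cons.mp h1 with h | h
          · exact hxa h
          · exact hin ⟨h, h2⟩
        rw [if_neg hne2]
        by_cases hoka : (pvPassB c e instrs a 0).2.2 = true
        · simp [hoka, PySem.Dict.get?_insert, hxa]
        · have hoka' : (pvPassB c e instrs a 0).2.2 = false := by simpa using hoka
          simp [hoka']

-- one pass of A's inner loop, from a reachable non-end node: it returns, takes j ≥ 1 steps
-- (for a nonempty suffix), lands on a connection value, and node_end stays reachable.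
theorem pvChunk (c : List (String × String)) (e : String) (instrs : List String) :
    ∀ (L : List String) (f i : Nat) (node : String) (n : Int),
      (L = [] → i = 0) →
      (L ≠ [] → L = instrs.drop i ∧ i + L.length = instrs.length) →
      (node == e) = false →
      pvReaches c e instrs f node i = true →
      ∃ (node' : String) (j : Nat),
        pvInnerA c e L node n = some (node', n + (j : Int)) ∧
        (L ≠ [] → 1 ≤ j ∧ node' ∈ c.map Prod.snd) ∧
        ((node' == e) = true ∨ ∃ f', f' + j ≤ f ∧ pvReaches c e instrs f' node' 0 = true) := by
  intro L
  induction L with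
  | nil =>
    intro f i node n h0 _ _ hr
    refine ⟨node, 0, by simp [pvInnerA], by simp, Or.inr ⟨f, by omega, ?_⟩⟩
    rw [← h0 rfl]; exact hr
  | cons ins rest ih =>
    intro f i node n _ hsuf hne hr
    obtain ⟨hdrop, hlen0⟩ := hsuf (by simp)
    have hlen : i + rest.length + 1 = instrs.length := by
      simpa [Nat.add_assoc] using hlen0
    have hget : instrs[i]? = some ins := by
      have h : (instrs.drop i)[0]? = instrs[i+0]? := List.getElem?_drop ..
      rw [← hdrop] at h
      simpa using h.symm
    have hnonempty : instrs.isEmpty = false := by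
      cases instrs with
      | nil => simp at hget
      | cons a l => simp
    cases f with
    | zero => simp [pvReaches, hne] at hr
    | succ g =>
      rw [pvReaches, hne, hnonempty, hget] at hr
      simp only [Bool.false_or] at hr
      cases hstep : (PySem.Dict.mk c).get? (node ++ ins) with
      | none => rw [hstep] at hr; simp at hr
      | some node1 =>
        rw [hstep] at hr
        have hmem1 : node1 ∈ c.map Prod.snd := pvGetMkMem c _ _ hstep
        by_cases hend1 : (node1 == e) = true
        · refine ⟨node1, 1, ?_, fun _ => ⟨le_rfl, hmem1⟩, Or.inl hend1⟩
          simp [pvInnerA, hstep, hend1]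
        · have hend1' : (node1 == e) = false := by simpa using hend1
          have hrest0 : rest = [] → (if i + 1 < instrs.length then i + 1 else 0) = 0 := by
            intro hr0
            subst hr0
            simp only [List.length_nil] at hlen
            rw [if_neg (by omega)]
          have hrestS : rest ≠ [] →
              rest = instrs.drop (if i + 1 < instrs.length then i + 1 else 0) ∧
              (if i + 1 < instrs.length then i + 1 else 0) + rest.length = instrs.length := by
            intro hr0
            have hrl : rest.length ≠ 0 := by
              simpa using (List.length_pos_iff.mpr hr0).ne'
            have hlt : i + 1 < instrs.length := by omega
            rw [if_pos hlt]
            constructor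
            · have : instrs.drop (i + 1) = (instrs.drop i).tail := by
                rw [List.drop_add_one_eq_tail_drop]
              rw [this, ← hdrop]
              rfl
            · omega
          obtain ⟨node', j', hinner, hmem', hcont⟩ :=
            ih g (if i + 1 < instrs.length then i + 1 else 0) node1 (n + 1) hrest0 hrestS hend1' hr
          refine ⟨node', j' + 1, ?_, fun _ => ⟨by omega, ?_⟩, ?_⟩
          · rw [pvInnerA, hstep]
            show (if (node1 == e) = true then some (node1, n + 1)
                  else pvInnerA c e rest node1 (n + 1)) = _
            rw [if_neg (by simp [hend1']), hinner]
            simp only [Option.some.injEq, Prod.mk.injEq, true_and]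
            push_cast
            ring
          · cases hre : rest with
            | nil =>
              subst hre
              simp only [pvInnerA, Option.some.injEq, Prod.mk.injEq] at hinner
              rw [← hinner.1]
              exact hmem1
            | cons b l =>
              exact (hmem' (by simp [hre])).2
          · rcases hcont with hE | ⟨f', hF, hR⟩
            · exact Or.inl hE
            · exact Or.inr ⟨f', by omega, hR⟩

-- the main simulation: A's pass-by-pass loop equals B's table-jump loop on reachable inputs,
-- for any current node that is the start node or a connection value.
theorem pvMain (ns e : String) (instrs : List String) (c : List (String × String)) :
    ∀ (f : Nat) (node : String) (n : Int),
      pvReaches c e instrs f node 0 = true →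
      (node = ns ∨ node ∈ c.map Prod.snd) →
      pvLoopA c e instrs f node n = pvJumpB (pvTableB ns e instrs c) e f node n := by
  intro f
  induction f with
  | zero => intro node n _ _; rfl
  | succ g ih =>
    intro node n hr hmem
    by_cases hend : (node == e) = true
    · rw [pvLoopA_of_end c e instrs _ _ _ hend, pvJumpB_of_end _ _ _ _ _ hend]
    · have hend' : (node == e) = false := by simpa using hend
      have hinstrs : instrs ≠ [] := by
        intro h
        subst h
        rw [pvReaches, hend'] at hr
        simp at hr
      obtain ⟨node', j, hinner, hLne, hcont⟩ :=
        pvChunk c e instrs instrs (g + 1) 0 node n (fun h => rfl)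
          (fun _ => ⟨by simp, by simp⟩) hend' hr
      obtain ⟨hj1, hmem'⟩ := hLne hinstrs
      -- A side: one pass
      have hA : pvLoopA c e instrs (g + 1) node n = pvLoopA c e instrs g node' (n + (j : Int)) := by
        rw [pvLoopA, if_neg (by simp [hend']), hinner]
      -- B side: convert the pass to the table entry
      have hpass := pvPassInner c e instrs node n 0
      rw [hinner] at hpass
      have hok : (pvPassB c e instrs node 0).2.2 = true := by
        by_contra hok
        rw [if_neg hok] at hpass
        simp at hpass
      rw [if_pos hok] at hpass
      have hp1 : (pvPassB c e instrs node 0).1 = node' := by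
        have := hpass.symm
        simp only [Option.some.injEq, Prod.mk.injEq] at this
        exact this.1
      have hp2 : (pvPassB c e instrs node 0).2.1 = (j : Int) := by
        have := hpass.symm
        simp only [Option.some.injEq, Prod.mk.injEq] at this
        have h2 := this.2
        omega
      have hmemset : node ∈ PySem.Set.update (PySem.Set.ofList [ns]) (c.map Prod.snd) := by
        rw [show PySem.Set.update (PySem.Set.ofList [ns]) (c.map Prod.snd)
              = PySem.Set.ofList ([ns] ++ c.map Prod.snd) from
            (PySem.Set.ofList_append [ns] (c.map Prod.snd)).symm]
        rw [PySem.Set.mem_ofList]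
        rcases hmem with h | h
        · exact List.mem_append_left _ (by simp [h])
        · exact List.mem_append_right _ h
      have htab : (pvTableB ns e instrs c).get? node = some ((j : Int), node') := by
        unfold pvTableB
        rw [pvTableFold c e instrs _ _ node, if_pos ⟨hmemset, hok⟩, hp1, hp2]
      have hB : pvJumpB (pvTableB ns e instrs c) e (g + 1) node n
          = pvJumpB (pvTableB ns e instrs c) e g node' (n + (j : Int)) := by
        rw [pvJumpB, if_neg (by simp [hend']), htab]
      rw [hA, hB]
      rcases hcont with hE | ⟨f', hF, hR⟩
      · rw [pvLoopA_of_end c e instrs _ _ _ hE, pvJumpB_of_end _ _ _ _ _ hE]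
      · have hR' : pvReaches c e instrs g node' 0 = true :=
          pvReaches_mono c e instrs f' g node' 0 (by omega) hR
        exact ih node' (n + (j : Int)) hR' (Or.inr hmem')

-- ===== VERDICT (by name: the statement is the Claim_ definition above) =====
theorem find_n_steps_part1_spec : Claim_equal_find_n_steps_part1 := by
  intro node_start node_end instructions connections _ hpre
  unfold Spec_find_n_steps_part1 find_n_steps_part1 find_n_steps_part1_alt
  by_cases hse : (node_start == node_end) = true
  · rw [if_pos hse, pvLoopA_of_end _ _ _ _ _ _ hse]
  · rw [if_neg hse]
    exact pvMain node_start node_end instructions connections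
      (pvFuel instructions connections) node_start 0 hpre (Or.inl rfl)
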